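-- pv_equiv track=rewrite | github.com/MatthieuSarter/AdventOfCode | AoC_2019/Day3/__init__.py | get_circuits_intersections
-- ===== SOURCE A (Python) =====
-- import functools, os, sys
--
-- def get_circuits_intersections(circuits):
--     # type: (List[Circuit]) -> List[Tuple[int, int]]
--     '''
--     Calculates the list of points where all the given circuits are present.
--     '''
--     intersections = []
--     for x in circuits[0].keys():
--         if functools.reduce(lambda x, y: x and y, [x in circuit for circuit in circuits]):
--             for y in circuits[0][x].keys():
--                 if x == 0 and y == 0:  # No intersection at start point
--                     continue
--                 if circuits[0][x][y] == 0:
--                     continue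
--
--                 intersect = functools.reduce(lambda x, y: x and y, [y in circuit[x] for circuit in circuits])
--                 if intersect:
--                     intersections.append((x, y))
--     return intersections
-- ===== SOURCE B (Python) =====
-- def get_circuits_intersections(circuits):
--     # type: (List[Circuit]) -> List[Tuple[int, int]]
--     '''
--     Calculates the list of points where all the given circuits are present.
--     '''
--     common = {(x, y) for x, row in circuits[0].items() for y in row}
--     for circuit in circuits[1:]:
--         common &= {(x, y) for x, row in circuit.items() for y in row}
--     intersections = []
--     for x, row in circuits[0].items():
--         for y, steps in row.items():
--             if (x, y) in common and steps != 0 and (x, y) != (0, 0):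
--                 intersections.append((x, y))
--     return intersections
-- ===== Notes on version B (the rewrite author's own statement) =====
-- stated objective: alternative
-- what changed: B first intersects, across all circuits, the flattened (x,y) key-pair sets into one common set, then makes a single ordered pass over circuits[0] keeping pairs that are in the common set, have a nonzero step value, and are not the origin; A instead runs a per-x membership reduce over all circuits and a second per-y reduce inside a nested loop.
-- outside the precondition, e.g. on get_circuits_intersections([]): A raises IndexError, B raises IndexError
import Mathlib
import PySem

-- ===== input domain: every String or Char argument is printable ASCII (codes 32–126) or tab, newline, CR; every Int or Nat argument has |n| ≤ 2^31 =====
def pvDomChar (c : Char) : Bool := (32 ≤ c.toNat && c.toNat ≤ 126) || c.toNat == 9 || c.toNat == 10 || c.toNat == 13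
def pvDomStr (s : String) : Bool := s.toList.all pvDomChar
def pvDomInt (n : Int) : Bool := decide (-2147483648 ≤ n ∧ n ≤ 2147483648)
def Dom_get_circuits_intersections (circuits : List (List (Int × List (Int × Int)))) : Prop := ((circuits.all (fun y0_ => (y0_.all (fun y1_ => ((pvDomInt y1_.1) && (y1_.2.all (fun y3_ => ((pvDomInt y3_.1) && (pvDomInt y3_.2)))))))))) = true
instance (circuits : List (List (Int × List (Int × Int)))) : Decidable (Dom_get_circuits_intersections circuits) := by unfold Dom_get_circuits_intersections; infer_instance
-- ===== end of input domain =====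

-- B builds one common set of (x,y) key pairs by intersecting the flattened circuits, then
-- makes a single pass over circuits[0]; A runs per-x / per-y membership reduces (objective: alternative).

-- ===== PORT A =====
-- dict lookup d[k] on the association list: first matching key ([] is the unreachable default;
-- A only subscripts keys it has just checked to be present)
def pvGetRow (d : List (Int × List (Int × Int))) (k : Int) : List (Int × Int) :=
  (d.find? (fun p => p.1 == k)).elim [] (·.2)

-- dict lookup d[k] on the inner association list (0 the unreachable default)
def pvGetVal (d : List (Int × Int)) (k : Int) : Int :=
  (d.find? (fun p => p.1 == k)).elim 0 (·.2)

-- functools.reduce(lambda x, y: x and y, bs) for the nonempty boolean lists A builds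
def pvRedAnd (bs : List Bool) : Bool := bs.foldl (fun a b => a && b) true

def get_circuits_intersections (circuits : List (List (Int × List (Int × Int)))) : List (Int × Int) :=
  match PySem.List.pyGet? circuits 0 with
  | none => []  -- circuits[0] raises IndexError: excluded by Pre_
  | some c0 =>
    (c0.map Prod.fst).foldl (fun intersections x =>
      if pvRedAnd (circuits.map (fun circuit => decide (x ∈ circuit.map Prod.fst))) then
        ((pvGetRow c0 x).map Prod.fst).foldl (fun ints y =>
          if x = 0 ∧ y = 0 then ints          -- no intersection at start point
          else if pvGetVal (pvGetRow c0 x) y = 0 then ints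
          else if pvRedAnd (circuits.map (fun circuit => decide (y ∈ (pvGetRow circuit x).map Prod.fst))) then
            ints ++ [(x, y)]
          else ints) intersections
      else intersections) []

-- ===== PORT B =====
-- {(x, y) for x, row in circuit.items() for y in row}
def pvPoints (circuit : List (Int × List (Int × Int))) : PySem.Set (Int × Int) :=
  PySem.Set.ofList (circuit.flatMap (fun xr => xr.2.map (fun yv => (xr.1, yv.1))))

def get_circuits_intersections_alt (circuits : List (List (Int × List (Int × Int)))) : List (Int × Int) :=
  match circuits with
  | [] => []  -- circuits[0] raises IndexError: excluded by Pre_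
  | c0 :: rest =>
    let common := rest.foldl (fun s circuit => PySem.Set.inter s (pvPoints circuit)) (pvPoints c0)
    c0.flatMap (fun xr =>
      (xr.2.filter (fun yv =>
          decide ((xr.1, yv.1) ∈ common) && decide (yv.2 ≠ 0) && decide ((xr.1, yv.1) ≠ ((0 : Int), (0 : Int))))).map
        (fun yv => (xr.1, yv.1)))

-- ===== PRECONDITION & SPEC =====
-- Pre_ excludes the empty list, on which A raises IndexError at circuits[0], and association
-- lists with a duplicated key at either dict level, which do not represent any Python dict
-- (a Python dict cannot hold two entries with the same key).
def Pre_get_circuits_intersections (circuits : List (List (Int × List (Int × Int)))) : Prop :=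
  circuits ≠ [] ∧
  ∀ c ∈ circuits, (c.map Prod.fst).Nodup ∧ ∀ p ∈ c, (p.2.map Prod.fst).Nodup
instance (circuits : List (List (Int × List (Int × Int)))) : Decidable (Pre_get_circuits_intersections circuits) := by unfold Pre_get_circuits_intersections; infer_instance

def pvWitness_get_circuits_intersections : (List (List (Int × List (Int × Int)))) :=
  [[(0, [(0, 0), (3, 5)]), (2, [(1, 4)])], [(2, [(1, 7)]), (0, [(3, 2)])]]

def Spec_get_circuits_intersections (circuits : List (List (Int × List (Int × Int)))) (out : List (Int × Int)) : Prop := out = get_circuits_intersections_alt circuits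
instance (circuits : List (List (Int × List (Int × Int)))) (out : List (Int × Int)) : Decidable (Spec_get_circuits_intersections circuits out) := by unfold Spec_get_circuits_intersections; infer_instance

-- ===== CLAIM (what is proved, stated in full; the proofs are below) =====
def Claim_equal_get_circuits_intersections : Prop := ∀ (circuits : List (List (Int × List (Int × Int)))), Dom_get_circuits_intersections circuits → Pre_get_circuits_intersections circuits → Spec_get_circuits_intersections circuits (get_circuits_intersections circuits)

theorem pv_foldl_and (bs : List Bool) (a : Bool) :
    bs.foldl (fun x y => x && y) a = (a && bs.all id) := by
  induction bs generalizing a with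
  | nil => simp
  | cons b bs ih => simp [ih, Bool.and_assoc]

theorem pvRedAnd_map_eq_all {α : Type} (l : List α) (f : α → Bool) :
    pvRedAnd (l.map f) = l.all f := by
  simp [pvRedAnd, pv_foldl_and, List.all_map]

theorem pv_find_of_mem_nodup {β : Type} {c : List (Int × β)}
    (h : (c.map Prod.fst).Nodup) {p : Int × β} (hp : p ∈ c) :
    c.find? (fun q => q.1 == p.1) = some p := by
  induction c with
  | nil => cases hp
  | cons a c ih =>
    simp only [List.map_cons, List.nodup_cons] at h
    rcases List.mem_cons.mp hp with rfl | hp'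
    · simp [List.find?]
    · have hne : ¬ (a.1 == p.1) = true := by
        simp only [beq_iff_eq]
        intro he
        exact h.1 (he ▸ List.mem_map_of_mem (f := Prod.fst) hp')
      simp [List.find?, hne, ih h.2 hp']

theorem pvGetRow_of_mem {c : List (Int × List (Int × Int))}
    (h : (c.map Prod.fst).Nodup) {p : Int × List (Int × Int)} (hp : p ∈ c) :
    pvGetRow c p.1 = p.2 := by
  simp [pvGetRow, pv_find_of_mem_nodup h hp]

theorem pvGetVal_of_mem {c : List (Int × Int)}
    (h : (c.map Prod.fst).Nodup) {p : Int × Int} (hp : p ∈ c) :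
    pvGetVal c p.1 = p.2 := by
  simp [pvGetVal, pv_find_of_mem_nodup h hp]

theorem pv_mem_pvPoints_iff {c : List (Int × List (Int × Int))}
    (h : (c.map Prod.fst).Nodup) (x y : Int) :
    (x, y) ∈ pvPoints c ↔ x ∈ c.map Prod.fst ∧ y ∈ (pvGetRow c x).map Prod.fst := by
  simp only [pvPoints, PySem.Set.mem_ofList, List.mem_flatMap, List.mem_map]
  constructor
  · rintro ⟨xr, hxr, yv, hyv, he⟩
    simp only [Prod.mk.injEq] at he
    obtain ⟨hx, hy⟩ := he
    refine ⟨⟨xr, hxr, hx⟩, ?_⟩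
    rw [← hx, pvGetRow_of_mem h hxr]
    exact ⟨yv, hyv, hy⟩
  · rintro ⟨⟨xr, hxr, hx⟩, hy⟩
    rw [← hx, pvGetRow_of_mem h hxr] at hy
    obtain ⟨yv, hyv, hye⟩ := hy
    exact ⟨xr, hxr, yv, hyv, by simp [hx, hye]⟩

theorem pv_mem_foldl_inter (rest : List (List (Int × List (Int × Int))))
    (s : PySem.Set (Int × Int)) (p : Int × Int) :
    p ∈ rest.foldl (fun s circuit => PySem.Set.inter s (pvPoints circuit)) s ↔
      p ∈ s ∧ ∀ c ∈ rest, p ∈ pvPoints c := by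
  induction rest generalizing s with
  | nil => simp
  | cons c rest ih =>
    simp only [List.foldl_cons, ih, PySem.Set.mem_inter, List.mem_cons]
    constructor
    · rintro ⟨⟨hs, hc⟩, hrest⟩
      exact ⟨hs, by rintro d (rfl | hd) <;> [exact hc; exact hrest d hd]⟩
    · rintro ⟨hs, hall⟩
      exact ⟨⟨hs, hall c (Or.inl rfl)⟩, fun d hd => hall d (Or.inr hd)⟩

-- ===== VERDICT (by name: the statement is the Claim_ definition above) =====
theorem get_circuits_intersections_spec : Claim_equal_get_circuits_intersections := by
  intro circuits _hdom hpre
  unfold Spec_get_circuits_intersections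
  obtain ⟨hne, hnd⟩ := hpre
  cases circuits with
  | nil => exact absurd rfl hne
  | cons c0 rest =>
  have hnd0 : (c0.map Prod.fst).Nodup := (hnd c0 (List.mem_cons_self ..)).1
  have hndin : ∀ p ∈ c0, (p.2.map Prod.fst).Nodup := (hnd c0 (List.mem_cons_self ..)).2
  simp only [get_circuits_intersections, get_circuits_intersections_alt]
  have h0 : PySem.List.pyGet? (c0 :: rest) 0 = some c0 := by
    simp [PySem.List.pyGet?, PySem.List.pyIdx?]
  rw [h0]
  -- collapse A's inner loop to a filter/map, per x
  have hinner : ∀ (x : Int) (acc : List (Int × Int)),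
      ((pvGetRow c0 x).map Prod.fst).foldl (fun ints y =>
          if x = 0 ∧ y = 0 then ints
          else if pvGetVal (pvGetRow c0 x) y = 0 then ints
          else if pvRedAnd ((c0 :: rest).map (fun circuit => decide (y ∈ (pvGetRow circuit x).map Prod.fst))) then
            ints ++ [(x, y)]
          else ints) acc
        = acc ++ (((pvGetRow c0 x).map Prod.fst).filter (fun y =>
            decide (¬(x = 0 ∧ y = 0) ∧ pvGetVal (pvGetRow c0 x) y ≠ 0 ∧
              pvRedAnd ((c0 :: rest).map (fun circuit => decide (y ∈ (pvGetRow circuit x).map Prod.fst))) = true))).map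
            (fun y => (x, y)) := by
    intro x acc
    have hf : (fun (ints : List (Int × Int)) y =>
          if x = 0 ∧ y = 0 then ints
          else if pvGetVal (pvGetRow c0 x) y = 0 then ints
          else if pvRedAnd ((c0 :: rest).map (fun circuit => decide (y ∈ (pvGetRow circuit x).map Prod.fst))) then
            ints ++ [(x, y)]
          else ints)
        = (fun ints y =>
          if (¬(x = 0 ∧ y = 0) ∧ pvGetVal (pvGetRow c0 x) y ≠ 0 ∧
              pvRedAnd ((c0 :: rest).map (fun circuit => decide (y ∈ (pvGetRow circuit x).map Prod.fst))) = true) then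
            ints ++ [(x, y)]
          else ints) := by
      funext ints y
      split_ifs <;> tauto
    rw [hf, PySem.List.foldl_append_ite]
  simp only [hinner]
  -- collapse A's outer loop to a flatMap over the keys
  have houter : (fun (intersections : List (Int × Int)) x =>
        if pvRedAnd ((c0 :: rest).map (fun circuit => decide (x ∈ circuit.map Prod.fst))) then
          intersections ++ (((pvGetRow c0 x).map Prod.fst).filter (fun y =>
            decide (¬(x = 0 ∧ y = 0) ∧ pvGetVal (pvGetRow c0 x) y ≠ 0 ∧
              pvRedAnd ((c0 :: rest).map (fun circuit => decide (y ∈ (pvGetRow circuit x).map Prod.fst))) = true))).map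
            (fun y => (x, y))
        else intersections)
      = (fun intersections x => intersections ++
          (if pvRedAnd ((c0 :: rest).map (fun circuit => decide (x ∈ circuit.map Prod.fst))) then
            (((pvGetRow c0 x).map Prod.fst).filter (fun y =>
              decide (¬(x = 0 ∧ y = 0) ∧ pvGetVal (pvGetRow c0 x) y ≠ 0 ∧
                pvRedAnd ((c0 :: rest).map (fun circuit => decide (y ∈ (pvGetRow circuit x).map Prod.fst))) = true))).map
              (fun y => (x, y))
          else [])) := by
    funext ints x
    split_ifs <;> simp
  rw [houter, PySem.List.foldl_append_eq_flatMap, List.flatMap_map]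
  simp only [List.nil_append]
  refine List.flatMap_congr ?_
  intro xr hxr
  have hrow : pvGetRow c0 xr.1 = xr.2 := pvGetRow_of_mem hnd0 hxr
  rw [hrow, List.filter_map, List.map_map]
  have hmemcommon : ∀ y : Int,
      ((xr.1, y) ∈ rest.foldl (fun s circuit => PySem.Set.inter s (pvPoints circuit)) (pvPoints c0)) ↔
        ∀ c ∈ c0 :: rest, (xr.1, y) ∈ pvPoints c := by
    intro y
    rw [pv_mem_foldl_inter]
    constructor
    · rintro ⟨h1, h2⟩ c hc
      rcases List.mem_cons.mp hc with rfl | hc' <;> [exact h1; exact h2 c hc']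
    · intro hall
      exact ⟨hall c0 (List.mem_cons_self ..), fun c hc => hall c (List.mem_cons.mpr (Or.inr hc))⟩
  by_cases hAx : ∀ c ∈ (c0 :: rest), xr.1 ∈ c.map Prod.fst
  · -- x present in every circuit: the per-y filters coincide
    have hA : pvRedAnd ((c0 :: rest).map (fun circuit => decide (xr.1 ∈ circuit.map Prod.fst))) = true := by
      rw [pvRedAnd_map_eq_all]
      simpa using hAx
    rw [if_pos hA]
    simp only [Function.comp_def]
    refine congrArg _ (List.filter_congr ?_)
    intro yv hyv
    have hval : pvGetVal xr.2 yv.1 = yv.2 := pvGetVal_of_mem (hndin xr hxr) hyv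
    have hred : ∀ y : Int,
        pvRedAnd ((c0 :: rest).map (fun circuit => decide (y ∈ (pvGetRow circuit xr.1).map Prod.fst))) = true ↔
          ∀ c ∈ c0 :: rest, y ∈ (pvGetRow c xr.1).map Prod.fst := by
      intro y
      rw [pvRedAnd_map_eq_all]
      simp
    have hmem : ((xr.1, yv.1) ∈ rest.foldl (fun s circuit => PySem.Set.inter s (pvPoints circuit)) (pvPoints c0)) ↔
        ∀ c ∈ c0 :: rest, yv.1 ∈ (pvGetRow c xr.1).map Prod.fst := by
      rw [hmemcommon]
      constructor
      · intro h c hc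
        exact ((pv_mem_pvPoints_iff (hnd c hc).1 xr.1 yv.1).mp (h c hc)).2
      · intro h c hc
        exact (pv_mem_pvPoints_iff (hnd c hc).1 xr.1 yv.1).mpr ⟨hAx c hc, h c hc⟩
    have hne00 : ((xr.1, yv.1) ≠ ((0 : Int), (0 : Int))) ↔ ¬(xr.1 = 0 ∧ yv.1 = 0) := by
      simp [Prod.ext_iff]
    simp only [hval, hred, hmem, hne00, Bool.decide_and, decide_not]
    ac_rfl
  · -- x missing from some circuit: both sides vanish
    have hA : pvRedAnd ((c0 :: rest).map (fun circuit => decide (xr.1 ∈ circuit.map Prod.fst))) = false := by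
      rw [pvRedAnd_map_eq_all]
      simpa using hAx
    rw [hA]
    simp only [Bool.false_eq_true, if_false]
    symm
    rw [List.map_eq_nil_iff, List.filter_eq_nil_iff]
    intro yv hyv
    simp only [Bool.and_eq_true, decide_eq_true_eq, not_and, and_imp]
    intro hc
    exfalso
    push Not at hAx
    obtain ⟨c, hc', hnotin⟩ := hAx
    rw [hmemcommon] at hc
    exact hnotin ((pv_mem_pvPoints_iff (hnd c hc').1 xr.1 yv.1).mp (hc c hc')).1
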